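-- pv_equiv track=rewrite | github.com/heosangmin/practiceAlgorithm | python_practice/Arcade/cs_8_matrixElementsSum.py | solution
-- ===== SOURCE A (Python) =====
-- def solution(matrix):
--     isHaunted = [False] * len(matrix[0])
--     result = 0
--     for row in range(len(matrix)):
--         for col in range(len(matrix[row])):
--             if not isHaunted[col]:
--                 if matrix[row][col] > 0:
--                     result += matrix[row][col]
--                 else:
--                     isHaunted[col] = True
--
--     return result
-- ===== SOURCE B (Python) =====
-- def solution(matrix):
--     result = 0
--     for col in range(len(matrix[0])):
--         for row in matrix:
--             if col < len(row):
--                 v = row[col]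
--                 if v > 0:
--                     result += v
--                 else:
--                     break
--     return result
-- ===== Notes on version B (the rewrite author's own statement) =====
-- stated objective: alternative
-- what changed: Column-major scan with an early break per column replaces A's row-major scan that maintains a persistent per-column 'haunted' boolean mask.
import Mathlib
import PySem

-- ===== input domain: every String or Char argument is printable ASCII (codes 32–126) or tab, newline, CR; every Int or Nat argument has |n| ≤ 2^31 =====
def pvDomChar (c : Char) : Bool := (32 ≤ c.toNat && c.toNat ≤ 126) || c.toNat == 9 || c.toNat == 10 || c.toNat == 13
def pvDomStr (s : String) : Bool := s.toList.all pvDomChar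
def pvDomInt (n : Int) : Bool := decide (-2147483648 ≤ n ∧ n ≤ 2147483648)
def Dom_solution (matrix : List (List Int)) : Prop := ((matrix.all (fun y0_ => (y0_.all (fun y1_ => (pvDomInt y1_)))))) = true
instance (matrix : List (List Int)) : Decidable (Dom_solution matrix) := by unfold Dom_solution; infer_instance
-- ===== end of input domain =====

-- B replaces A's row-major scan with a persistent per-column boolean mask by a
-- column-major scan that breaks out of a column at the first non-positive entry
-- (objective: alternative decomposition; same asymptotic cost).

-- ===== PORT A =====
-- inner loop body: for col, if not isHaunted[col]: add positive value or mark haunted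
-- (getD/set are in range on Pre_; outside Pre_ Python raises IndexError)
def stepA (row : List Int) (st : List Bool × Int) (c : Nat) : List Bool × Int :=
  if st.1.getD c false then st
  else if row.getD c 0 > 0 then (st.1, st.2 + row.getD c 0)
  else (st.1.set c true, st.2)

-- one row of A's outer loop: for col in range(len(row))
def rowLoopA (st : List Bool × Int) (row : List Int) : List Bool × Int :=
  (List.range row.length).foldl (stepA row) st

-- matrix[0] via headD: Python raises IndexError on an empty matrix (excluded by Pre_)
def solution (matrix : List (List Int)) : Int :=
  (matrix.foldl rowLoopA (List.replicate (matrix.headD []).length false, 0)).2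

-- ===== PORT B =====
-- B's inner loop: walk the rows of one column, accumulating positives, breaking at the first v ≤ 0
def bRows (c : Nat) (r : Int) : List (List Int) → Int
  | [] => r
  | row :: rest =>
      if c < row.length then
        if row.getD c 0 > 0 then bRows c (r + row.getD c 0) rest else r
      else bRows c r rest

def solution_alt (matrix : List (List Int)) : Int :=
  (List.range (matrix.headD []).length).foldl (fun r c => bRows c r matrix) 0

-- ===== PRECONDITION & SPEC =====
-- Pre_ excludes exactly the inputs on which Python A raises IndexError:
-- the empty matrix (matrix[0]), and matrices with a row longer than the first row
-- (isHaunted[col] is indexed beyond len(matrix[0])).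
def Pre_solution (matrix : List (List Int)) : Prop :=
  matrix ≠ [] ∧ ∀ row ∈ matrix, row.length ≤ (matrix.headD []).length
instance (matrix : List (List Int)) : Decidable (Pre_solution matrix) := by
  unfold Pre_solution; infer_instance
def pvWitness_solution : List (List Int) := [[1, 2], [3, 0], [5, 7]]

def Spec_solution (matrix : List (List Int)) (out : Int) : Prop := out = solution_alt matrix
instance (matrix : List (List Int)) (out : Int) : Decidable (Spec_solution matrix out) := by unfold Spec_solution; infer_instance

-- ===== CLAIM (what is proved, stated in full; the proofs are below) =====
def Claim_equal_solution : Prop := ∀ (matrix : List (List Int)), Dom_solution matrix → Pre_solution matrix → Spec_solution matrix (solution matrix)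

-- ===== LEMMAS AND PROOFS =====

-- bRows threads its accumulator additively
lemma bRows_acc (c : Nat) (r : Int) (rows : List (List Int)) :
    bRows c r rows = r + bRows c 0 rows := by
  induction rows generalizing r with
  | nil => simp [bRows]
  | cons row rest ih =>
    simp only [bRows]
    split_ifs with h1 h2
    · rw [ih, ih (0 + _)]; ring
    · ring
    · exact ih r

-- B's outer fold is the sum of the per-column contributions
lemma alt_fold (m : List (List Int)) (n : Nat) (r : Int) :
    (List.range n).foldl (fun r c => bRows c r m) r
      = r + ∑ c ∈ Finset.range n, bRows c 0 m := by
  induction n generalizing r with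
  | zero => simp
  | succ n ih =>
    rw [List.range_succ, List.foldl_append, ih, Finset.sum_range_succ]
    simp only [List.foldl_cons, List.foldl_nil]
    rw [bRows_acc]; ring

-- A's inner fold: length preservation
lemma stepA_len_one (row : List Int) (st : List Bool × Int) (c : Nat) :
    (stepA row st c).1.length = st.1.length := by
  unfold stepA; split_ifs <;> simp

lemma stepA_len (row : List Int) (n : Nat) (h : List Bool) (r : Int) :
    ((List.range n).foldl (stepA row) (h, r)).1.length = h.length := by
  induction n generalizing h r with
  | zero => rfl
  | succ n ih =>
    rw [List.range_succ, List.foldl_append]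
    simp only [List.foldl_cons, List.foldl_nil]
    rw [stepA_len_one]
    exact ih h r

lemma getD_set_true (l : List Bool) (i j : Nat) :
    (l.set i true).getD j false
      = if j = i ∧ i < l.length then true else l.getD j false := by
  simp only [List.getD]
  rw [List.getElem?_set]
  split_ifs <;> simp_all

-- pointwise value of A's haunted mask after scanning the first n columns of one row
lemma stepA_haunted (row : List Int) (h : List Bool) (hrow : row.length ≤ h.length)
    (n : Nat) (hn : n ≤ row.length) (r : Int) (c : Nat) :
    ((List.range n).foldl (stepA row) (h, r)).1.getD c false
      = (h.getD c false || (decide (c < n) && decide (row.getD c 0 ≤ 0))) := by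
  induction n generalizing r c with
  | zero => simp
  | succ n ih =>
    have hn' : n ≤ row.length := Nat.le_of_succ_le hn
    rw [List.range_succ, List.foldl_append]
    simp only [List.foldl_cons, List.foldl_nil]
    set st := (List.range n).foldl (stepA row) (h, r) with hst
    have hlen1 : st.1.length = h.length := stepA_len row n h r
    have hptn : st.1.getD n false = h.getD n false := by
      rw [ih hn' r n]; simp
    have hd : decide (c < n + 1) = (decide (c = n) || decide (c < n)) := by
      by_cases h1 : c = n
      · simp [h1]
      · by_cases h2 : c < n <;> simp [h1, h2] <;> omega
    by_cases hh : h.getD n false = true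
    · -- already haunted at n : mask unchanged
      have hfst : (stepA row st n).1 = st.1 := by
        unfold stepA; rw [hptn, if_pos hh]
      rw [hfst, ih hn' r c, hd]
      by_cases hc : c = n
      · subst hc; rw [hh]; simp
      · simp [hc]
    · have hhf : h.getD n false = false := by simpa using hh
      by_cases hv : row.getD n 0 > 0
      · -- value > 0 : mask unchanged
        have hfst : (stepA row st n).1 = st.1 := by
          unfold stepA
          rw [hptn, if_neg hh, if_pos hv]
        rw [hfst, ih hn' r c, hd]
        by_cases hc : c = n
        · subst hc
          have h1 : decide (row.getD c 0 ≤ 0) = false :=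
            decide_eq_false (by omega)
          rw [hhf, h1]
          simp
        · simp [hc]
      · -- value ≤ 0 : mask set at n
        have hvle : row.getD n 0 ≤ 0 := by omega
        have hfst : (stepA row st n).1 = st.1.set n true := by
          unfold stepA
          rw [hptn, if_neg hh, if_neg hv]
        rw [hfst, getD_set_true, hlen1]
        by_cases hc : c = n
        · subst hc
          rw [if_pos ⟨rfl, by omega⟩, hhf, decide_eq_true hvle]
          simp
        · rw [if_neg (by simp [hc]), ih hn' r c, hd]
          simp [hc]

-- the result accumulated by A while scanning the first n columns of one row
lemma stepA_result (row : List Int) (h : List Bool) (hrow : row.length ≤ h.length)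
    (n : Nat) (hn : n ≤ row.length) (r : Int) :
    ((List.range n).foldl (stepA row) (h, r)).2
      = r + ∑ c ∈ Finset.range n,
          (if h.getD c false = false ∧ row.getD c 0 > 0 then row.getD c 0 else 0) := by
  induction n generalizing r with
  | zero => simp
  | succ n ih =>
    have hn' : n ≤ row.length := Nat.le_of_succ_le hn
    rw [List.range_succ, List.foldl_append]
    simp only [List.foldl_cons, List.foldl_nil]
    set st := (List.range n).foldl (stepA row) (h, r) with hst
    have hptn : st.1.getD n false = h.getD n false := by
      rw [stepA_haunted row h hrow n hn' r n]; simp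
    have hsnd : st.2 = r + ∑ c ∈ Finset.range n,
        (if h.getD c false = false ∧ row.getD c 0 > 0 then row.getD c 0 else 0) := ih hn' r
    rw [Finset.sum_range_succ, ← add_assoc, ← hsnd]
    by_cases hh : h.getD n false = true
    · have hsnd2 : (stepA row st n).2 = st.2 := by
        unfold stepA; rw [hptn, if_pos hh]
      rw [hsnd2, if_neg (by rw [hh]; simp)]
      ring
    · have hhf : h.getD n false = false := by simpa using hh
      by_cases hv : row.getD n 0 > 0
      · have hsnd2 : (stepA row st n).2 = st.2 + row.getD n 0 := by
          unfold stepA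
          rw [hptn, if_neg hh, if_pos hv]
        rw [hsnd2, if_pos ⟨hhf, hv⟩]
      · have hsnd2 : (stepA row st n).2 = st.2 := by
          unfold stepA
          rw [hptn, if_neg hh, if_neg hv]
        rw [hsnd2, if_neg (by tauto)]
        ring

-- per-column bookkeeping: one row's contribution plus the rest under the updated mask
-- equals the whole column walk under the old mask
lemma colStep (row : List Int) (rest : List (List Int)) (h : List Bool) (c : Nat) :
    (if h.getD c false = false ∧ row.getD c 0 > 0 then row.getD c 0 else 0)
      + (if (h.getD c false = true) ∨ (c < row.length ∧ row.getD c 0 ≤ 0) then 0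
         else bRows c 0 rest)
      = if h.getD c false then 0 else bRows c 0 (row :: rest) := by
  by_cases hh : h.getD c false = true
  · rw [if_neg (by rw [hh]; simp), if_pos (Or.inl hh), if_pos hh]; ring
  · have hhf : h.getD c false = false := by simpa using hh
    rw [if_neg hh]
    by_cases hcl : c < row.length
    · by_cases hv : row.getD c 0 > 0
      · rw [if_pos ⟨hhf, hv⟩, if_neg (by rintro (h1 | ⟨_, h2⟩); exact hh h1; omega)]
        simp only [bRows]
        rw [if_pos hcl, if_pos hv, bRows_acc c (0 + row.getD c 0) rest]
        ring
      · rw [if_neg (by tauto), if_pos (Or.inr ⟨hcl, by omega⟩)]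
        simp only [bRows]
        rw [if_pos hcl, if_neg hv]
        ring
    · have hz : row.getD c 0 = 0 := List.getD_eq_default _ _ (Nat.le_of_not_lt hcl)
      rw [if_neg (by rw [hz]; rintro ⟨_, h2⟩; omega),
          if_neg (by rintro (h1 | ⟨h2, _⟩); exact hh h1; exact hcl h2)]
      simp only [bRows]
      rw [if_neg hcl]
      ring

-- A's outer fold equals the sum over columns of B's per-column walk
lemma outer (rows : List (List Int)) (h : List Bool) (r : Int)
    (hlen : ∀ row ∈ rows, row.length ≤ h.length) :
    (rows.foldl rowLoopA (h, r)).2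
      = r + ∑ c ∈ Finset.range h.length,
          (if h.getD c false then 0 else bRows c 0 rows) := by
  induction rows generalizing h r with
  | nil =>
    simp only [List.foldl_nil]
    have : ∀ c ∈ Finset.range h.length,
        (if h.getD c false then (0:Int) else bRows c 0 []) = 0 := by
      intro c _; by_cases hh : h.getD c false <;> simp [bRows]
    rw [Finset.sum_congr rfl this]; simp
  | cons row rest ih =>
    have hrow : row.length ≤ h.length := hlen row List.mem_cons_self
    have hrest : ∀ q ∈ rest, q.length ≤ h.length :=
      fun q hq => hlen q (List.mem_cons_of_mem _ hq)
    simp only [List.foldl_cons]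
    have hunf : rowLoopA (h, r) row
        = (List.range row.length).foldl (stepA row) (h, r) := rfl
    set st := rowLoopA (h, r) row with hst
    have hlen1 : st.1.length = h.length := stepA_len row row.length h r
    have hpt : ∀ c, st.1.getD c false
        = (h.getD c false || (decide (c < row.length) && decide (row.getD c 0 ≤ 0))) :=
      fun c => stepA_haunted row h hrow row.length le_rfl r c
    have hsnd : st.2 = r + ∑ c ∈ Finset.range row.length,
        (if h.getD c false = false ∧ row.getD c 0 > 0 then row.getD c 0 else 0) :=
      stepA_result row h hrow row.length le_rfl r
    have hrest' : ∀ q ∈ rest, q.length ≤ st.1.length := by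
      intro q hq; rw [hlen1]; exact hrest q hq
    have hih := ih st.1 st.2 hrest'
    rw [Prod.mk.eta] at hih
    rw [hih, hlen1, hsnd]
    simp only [hpt]
    have hext : ∑ c ∈ Finset.range row.length,
          (if h.getD c false = false ∧ row.getD c 0 > 0 then row.getD c 0 else 0)
        = ∑ c ∈ Finset.range h.length,
          (if h.getD c false = false ∧ row.getD c 0 > 0 then row.getD c 0 else 0) := by
      apply Finset.sum_subset (by intro x hx; simp only [Finset.mem_range] at *; omega)
      intro c _ hc
      simp only [Finset.mem_range, not_lt] at hc
      have hz : row.getD c 0 = 0 := List.getD_eq_default _ _ (by omega)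
      rw [if_neg (by rw [hz]; rintro ⟨_, h2⟩; omega)]
    rw [hext, add_assoc, ← Finset.sum_add_distrib]
    congr 1
    apply Finset.sum_congr rfl
    intro c _
    have hcond : ((h.getD c false
          || (decide (c < row.length) && decide (row.getD c 0 ≤ 0))) = true)
        ↔ ((h.getD c false = true) ∨ (c < row.length ∧ row.getD c 0 ≤ 0)) := by
      simp
    rw [if_congr hcond rfl rfl]
    exact colStep row rest h c

-- ===== VERDICT (by name: the statement is the Claim_ definition above) =====
theorem solution_spec : Claim_equal_solution := by
  intro matrix _ hpre
  unfold Spec_solution solution solution_alt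
  obtain ⟨hne, hle⟩ := hpre
  rw [alt_fold]
  rw [outer matrix (List.replicate (matrix.headD []).length false) 0
        (by intro row hr; simpa using hle row hr)]
  simp
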